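-- pv_equiv track=rewrite | github.com/mvasinek/olgen-om-error-prediction | solution.py | maeBins
-- ===== SOURCE A (Python) =====
-- def maeBins(a, b, lim):
--     mae = 0
--
--     for i in range(int(lim/25)):
--         p_sum_a = 0
--         p_sum_b = 0
--         for j in range(25):
--             p_sum_a += a[i*25 + j]
--             p_sum_b += b[i*25 + j]
--
--         mae += 25*abs(p_sum_a - p_sum_b)
--
--     return mae
-- ===== SOURCE B (Python) =====
-- def maeBins(a, b, lim):
--     bins = int(lim / 25)
--     if bins <= 0:
--         return 0
--     n = 25 * bins
--     pref = [0]
--     for k in range(n):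
--         pref.append(pref[k] + (a[k] - b[k]))
--     return sum(25 * abs(pref[(i + 1) * 25] - pref[i * 25]) for i in range(bins))
-- ===== Notes on version B (the rewrite author's own statement) =====
-- stated objective: alternative
-- what changed: Replaces A's per-bin inner 25-element re-scan by a single prefix-sum pass over the element-wise differences, each bin sum becoming one subtraction of two prefix values.
import Mathlib
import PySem

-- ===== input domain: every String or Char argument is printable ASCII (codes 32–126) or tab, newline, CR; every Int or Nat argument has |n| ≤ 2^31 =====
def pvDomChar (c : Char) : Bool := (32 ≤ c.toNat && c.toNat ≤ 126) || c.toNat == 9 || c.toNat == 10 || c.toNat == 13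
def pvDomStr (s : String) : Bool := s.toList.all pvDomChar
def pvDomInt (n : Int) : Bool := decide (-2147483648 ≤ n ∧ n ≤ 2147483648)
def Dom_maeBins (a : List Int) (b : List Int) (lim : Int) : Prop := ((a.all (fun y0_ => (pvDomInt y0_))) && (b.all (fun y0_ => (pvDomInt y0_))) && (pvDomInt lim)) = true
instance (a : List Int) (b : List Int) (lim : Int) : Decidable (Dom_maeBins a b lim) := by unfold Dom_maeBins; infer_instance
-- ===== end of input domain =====

-- B replaces A's per-bin inner re-scan by one prefix-sum pass over the element-wise
-- differences, each bin sum becoming one subtraction (objective: alternative decomposition).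

-- ===== PORT A =====
def maeBins (a : List Int) (b : List Int) (lim : Int) : Int :=
  (PySem.List.pyRange 0 (PySem.Int.truncdiv lim 25) 1).foldl
    (fun mae i =>
      let p := (PySem.List.pyRange 0 25 1).foldl
        (fun (p : Int × Int) j =>
          (p.1 + PySem.List.pyGetD a (i * 25 + j) 0,
           p.2 + PySem.List.pyGetD b (i * 25 + j) 0)) (0, 0)
      mae + 25 * |p.1 - p.2|) 0

-- ===== PORT B =====
def maeBins_alt (a : List Int) (b : List Int) (lim : Int) : Int :=
  let bins := PySem.Int.truncdiv lim 25
  if bins ≤ 0 then 0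
  else
    let n := 25 * bins
    let pref := (PySem.List.pyRange 0 n 1).foldl
      (fun (pref : List Int) k =>
        pref ++ [PySem.List.pyGetD pref k 0 +
                 (PySem.List.pyGetD a k 0 - PySem.List.pyGetD b k 0)]) [0]
    ((PySem.List.pyRange 0 bins 1).map
      (fun i => 25 * |PySem.List.pyGetD pref ((i + 1) * 25) 0 -
                      PySem.List.pyGetD pref (i * 25) 0|)).sum

-- ===== PRECONDITION & SPEC =====
-- Pre_ excludes exactly the inputs where Python A raises IndexError: both lists must
-- carry the 25*int(lim/25) elements the bin loop reads.
def Pre_maeBins (a : List Int) (b : List Int) (lim : Int) : Prop :=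
  (25 * PySem.Int.truncdiv lim 25).toNat ≤ a.length ∧
  (25 * PySem.Int.truncdiv lim 25).toNat ≤ b.length
instance (a : List Int) (b : List Int) (lim : Int) : Decidable (Pre_maeBins a b lim) := by
  unfold Pre_maeBins; infer_instance

def pvWitness_maeBins : List Int × List Int × Int :=
  ([3, 1, 4, 1, 5, 9, 2, 6, 5, 3, 5, 8, 9, 7, 9, 3, 2, 3, 8, 4, 6, 2, 6, 4, 3],
   [2, 7, 1, 8, 2, 8, 1, 8, 2, 8, 4, 5, 9, 0, 4, 5, 2, 3, 5, 3, 6, 0, 2, 8, 7], 30)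

def Spec_maeBins (a : List Int) (b : List Int) (lim : Int) (out : Int) : Prop := out = maeBins_alt a b lim
instance (a : List Int) (b : List Int) (lim : Int) (out : Int) : Decidable (Spec_maeBins a b lim out) := by unfold Spec_maeBins; infer_instance

-- ===== CLAIM (what is proved, stated in full; the proofs are below) =====
def Claim_equal_maeBins : Prop := ∀ (a : List Int) (b : List Int) (lim : Int), Dom_maeBins a b lim → Pre_maeBins a b lim → Spec_maeBins a b lim (maeBins a b lim)

-- ===== LEMMAS AND PROOFS =====

/-- Prefix sum of the first `k` element-wise differences (with `pyGetD`'s default 0). -/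
def pvS (a : List Int) (b : List Int) (k : Nat) : Int :=
  ((List.range k).map (fun j => a.getD j 0 - b.getD j 0)).sum

theorem pvS_succ (a b : List Int) (k : Nat) :
    pvS a b (k + 1) = pvS a b k + (a.getD k 0 - b.getD k 0) := by
  simp [pvS, List.range_succ]

theorem sum_map_sub (l : List Nat) (f g : Nat -> Int) :
    (l.map (fun x => f x - g x)).sum = (l.map f).sum - (l.map g).sum := by
  induction l with
  | nil => simp
  | cons x xs ih => simp [ih]; ring

/-- The list B's fold builds is the table of prefix sums `pvS`. -/
theorem pref_spec (a b : List Int) (N : Nat) :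
    (PySem.List.pyRange 0 (N : Int) 1).foldl
      (fun (pref : List Int) k =>
        pref ++ [PySem.List.pyGetD pref k 0 +
                 (PySem.List.pyGetD a k 0 - PySem.List.pyGetD b k 0)]) [0]
    = (List.range (N + 1)).map (pvS a b) := by
  induction N with
  | zero => simp [pvS]
  | succ N ih =>
      have hsplit : PySem.List.pyRange 0 ((N + 1 : Nat) : Int) 1
          = PySem.List.pyRange 0 (N : Int) 1 ++ [(N : Int)] := by
        push_cast
        exact PySem.List.pyRange_one_succ_right (by positivity)
      rw [hsplit, List.foldl_append, ih]
      simp only [List.foldl, PySem.List.pyGetD_natCast]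
      have hget : (List.map (pvS a b) (List.range (N + 1))).getD N 0 = pvS a b N := by
        simp [List.getD]
      rw [hget, List.range_succ (n := N + 1), List.map_append]
      simp [pvS_succ]

/-- A's inner 25-step loop computes the two bin sums. -/
theorem inner_spec (a b : List Int) (k0 : Nat) :
    (PySem.List.pyRange 0 25 1).foldl
      (fun (p : Int × Int) j =>
        (p.1 + PySem.List.pyGetD a ((k0 : Int) + j) 0,
         p.2 + PySem.List.pyGetD b ((k0 : Int) + j) 0)) (0, 0)
    = (((List.range 25).map (fun j => a.getD (k0 + j) 0)).sum,
       ((List.range 25).map (fun j => b.getD (k0 + j) 0)).sum) := by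
  rw [PySem.List.foldl_prod_mk
    (f := fun s e => s + PySem.List.pyGetD a ((k0 : Int) + e) 0)
    (g := fun s e => s + PySem.List.pyGetD b ((k0 : Int) + e) 0)]
  rw [PySem.List.foldl_add _ (fun j => PySem.List.pyGetD a ((k0 : Int) + j) 0) 0,
      PySem.List.foldl_add _ (fun j => PySem.List.pyGetD b ((k0 : Int) + j) 0) 0]
  rw [PySem.List.pyRange_one]
  norm_num [Prod.mk.injEq]
  constructor <;>
    (rw [show Int.toNat 25 = 25 from rfl]; apply congrArg List.sum;
     apply List.map_congr_left; intro k hk;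
     show PySem.List.pyGetD _ ((k0 : Int) + (k : Int)) 0 = _;
     rw [← Nat.cast_add, PySem.List.pyGetD_natCast]; rfl)

/-- The bin sum of differences is a difference of prefix sums. -/
theorem bin_diff (a b : List Int) (k0 : Nat) :
    pvS a b (k0 + 25) - pvS a b k0
    = ((List.range 25).map (fun j => a.getD (k0 + j) 0)).sum
    - ((List.range 25).map (fun j => b.getD (k0 + j) 0)).sum := by
  unfold pvS
  rw [List.range_add, List.map_append, List.sum_append, List.map_map,
      Function.comp_def]
  rw [sum_map_sub (List.range 25) (fun x => a.getD (k0 + x) 0) (fun x => b.getD (k0 + x) 0)]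
  ring

-- ===== VERDICT (by name: the statement is the Claim_ definition above) =====
theorem maeBins_spec : Claim_equal_maeBins := by
  intro a b lim _ _
  unfold Spec_maeBins maeBins maeBins_alt
  set m := PySem.Int.truncdiv lim 25 with hm
  by_cases hle : m ≤ 0
  · rw [PySem.List.pyRange_one_eq_nil hle]
    simp [hle]
  · simp only [if_neg hle]
    push Not at hle
    have hN : (25 * m) = ((25 * m).toNat : Int) := by
      have : 0 ≤ 25 * m := by positivity
      omega
    rw [hN, pref_spec]
    rw [PySem.List.foldl_add _
      (fun i =>
        25 * |((PySem.List.pyRange 0 25 1).foldl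
            (fun (p : Int × Int) j =>
              (p.1 + PySem.List.pyGetD a (i * 25 + j) 0,
               p.2 + PySem.List.pyGetD b (i * 25 + j) 0)) (0, 0)).1 -
             ((PySem.List.pyRange 0 25 1).foldl
            (fun (p : Int × Int) j =>
              (p.1 + PySem.List.pyGetD a (i * 25 + j) 0,
               p.2 + PySem.List.pyGetD b (i * 25 + j) 0)) (0, 0)).2|) 0]
    rw [zero_add]
    apply congrArg List.sum
    apply List.map_congr_left
    intro i hi
    rw [PySem.List.mem_pyRange_one] at hi
    obtain ⟨hi0, him⟩ := hi
    have hk0 : i * 25 = (((i * 25).toNat : Nat) : Int) := by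
      have : 0 ≤ i * 25 := by positivity
      omega
    set k0 : Nat := (i * 25).toNat with hk0def
    have hk1 : (i + 1) * 25 = (((k0 + 25 : Nat)) : Int) := by
      push_cast
      rw [← hk0]; ring
    have hlt0 : k0 < (25 * m).toNat + 1 := by
      have h1 : i * 25 < 25 * m := by nlinarith
      omega
    have hlt1 : k0 + 25 < (25 * m).toNat + 1 := by
      have h1 : (i + 1) * 25 ≤ 25 * m := by nlinarith
      have h2 : 0 ≤ i * 25 := by positivity
      omega
    have hg0 : (List.map (pvS a b) (List.range ((25 * m).toNat + 1))).getD k0 0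
        = pvS a b k0 := by
      simp [List.getD, List.getElem?_range hlt0]
    have hg1 : (List.map (pvS a b) (List.range ((25 * m).toNat + 1))).getD (k0 + 25) 0
        = pvS a b (k0 + 25) := by
      simp [List.getD, List.getElem?_range hlt1]
    rw [hk1, hk0, PySem.List.pyGetD_natCast, PySem.List.pyGetD_natCast]
    rw [hg0, hg1, inner_spec, bin_diff]
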